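-- pv_equiv track=rewrite | github.com/cpark7/algorithm | new_id_kakao/not_using_re.py | solution
-- ===== SOURCE A (Python) =====
-- def solution(new_id):
--     sp = ['-', '_', '.']
--     # 1단계
--     new_id = new_id.lower()
--     # 2단계 특문 제거
--     length = len(new_id)
--     new_id = list(new_id)
--
--     for i in range(length):
--         if new_id[i] not in sp and not new_id[i].isalnum():
--             new_id[i] = ""
--     new_id = "".join(new_id)
--     #3단계 . 중복제거
--     length = len(new_id)
--     new_id = list(new_id)
--
--     for i in range(length):
--         if new_id[i] =='.':
--             j = 1
--             while(i+j < length and new_id[i+j] == "."):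
--                 new_id[i+j] = ""
--                 j += 1
--     new_id = "".join(new_id)
--
--     #4단계
--     if new_id and new_id[0] == '.':
--         new_id = new_id[1:]
--     if new_id and new_id[-1] == '.':
--         new_id = new_id[:-1]
--     #5단계
--     if not new_id:
--         new_id = "a"
--     #6단계
--     if len(new_id) >=16:
--         new_id = new_id[:15]
--         if new_id[-1] == '.':
--             new_id = new_id[:-1]
--     #7단계
--     while(len(new_id) <=2):
--         new_id+=new_id[-1]
--     return new_id
-- ===== SOURCE B (Python) =====
-- def solution(new_id):
--     # single pass: filter allowed chars and collapse dot runs at the same time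
--     out = []
--     for ch in new_id.lower():
--         if ch.isalnum() or ch in '-_':
--             out.append(ch)
--         elif ch == '.' and out and out[-1] != '.':
--             out.append(ch)
--     # collapsing means at most one leading dot was possible, and the
--     # "not out" case above already drops leading dots entirely
--     s = ''.join(out)
--     s = s.removesuffix('.')
--     if not s:
--         s = 'a'
--     if len(s) >= 16:
--         s = s[:15]
--         s = s.removesuffix('.')
--     return s.ljust(3, s[-1])
-- ===== Notes on version B (the rewrite author's own statement) =====
-- stated objective: simpler
-- what changed: A mutates char arrays in place over index ranges (a blanking pass, a nested while that blanks each dot run, then strips one leading and one trailing dot); B does one left fold that filters allowed characters and collapses dot runs simultaneously (so no leading dot can arise), then drops one trailing dot and pads to length 3 with the last character in closed form instead of the append-one-char while.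
import Mathlib
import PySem

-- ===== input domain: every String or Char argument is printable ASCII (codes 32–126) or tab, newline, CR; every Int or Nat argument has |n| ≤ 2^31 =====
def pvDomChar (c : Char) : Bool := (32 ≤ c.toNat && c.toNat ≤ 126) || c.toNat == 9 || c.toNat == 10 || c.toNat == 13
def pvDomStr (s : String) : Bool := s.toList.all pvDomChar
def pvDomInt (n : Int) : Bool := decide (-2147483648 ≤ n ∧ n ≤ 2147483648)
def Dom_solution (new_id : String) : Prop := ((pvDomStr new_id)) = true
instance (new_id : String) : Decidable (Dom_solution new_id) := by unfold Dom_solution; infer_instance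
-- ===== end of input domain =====

-- B replaces A's in-place index-mutating passes (blank bad chars, nested while blanking
-- each dot run, then strip edge dots) by ONE left fold that filters and collapses dots
-- together, and A's append-one-char-at-a-time while by a closed-form pad; objective: simpler.

-- ===== PORT A =====

-- inner `while (i+j < length and new_id[i+j] == '.')` of step 3: blank the run in place
def pvBlankRun (a : List (List Char)) (i j length : Nat) : List (List Char) :=
  if h : i + j < length ∧ a.getD (i + j) [] = ['.'] then
    pvBlankRun (a.set (i + j) []) i (j + 1) length
  else a
termination_by length - j
decreasing_by omega

-- step 7: `while len(new_id) <= 2: new_id += new_id[-1]`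
def pvPad7 (l : List Char) : List Char :=
  if _h : l.length ≤ 2 then
    match l.getLast? with
    | none => l
    | some c => pvPad7 (l ++ [c])
  else l
termination_by 3 - l.length
decreasing_by simp; omega

def solution (new_id : String) : String :=
  -- step 1: lower;  step 2: for-range loop blanking chars in place (list of 1-char
  -- strings, "" = [] : List Char);  "".join = flatten
  let s1 := PySem.Chars.lower new_id.toList
  let len2 := s1.length
  let l2 := (List.range len2).foldl (fun acc i =>
      if acc.getD i [] ∉ [['-'], ['_'], ['.']] ∧ PySem.Chars.strIsalnum (acc.getD i []) = false
      then acc.set i [] else acc)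
      (s1.map (fun c => [c]))
  let s2 := l2.flatten
  let len3 := s2.length
  let l3 := (List.range len3).foldl (fun acc i =>
      if acc.getD i [] = ['.'] then pvBlankRun acc i 1 len3 else acc)
      (s2.map (fun c => [c]))
  let s3 := l3.flatten
  let s4 := if s3.head? = some '.' then s3.drop 1 else s3
  let s4b := if s4.getLast? = some '.' then s4.dropLast else s4
  let s5 := if s4b = [] then ['a'] else s4b
  let s6 := if 16 ≤ s5.length then
              (let t := s5.take 15; if t.getLast? = some '.' then t.dropLast else t)
            else s5
  String.ofList (pvPad7 s6)

-- ===== PORT B =====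

def solution_alt (new_id : String) : String :=
  -- one pass: keep alnum/-/_ chars, keep a '.' only after a kept non-'.' char;
  -- then removesuffix('.'), the empty→"a" and truncate steps, and s.ljust(3, s[-1])
  -- (s is never empty at the ljust: Python would raise there)
  let out := (PySem.Chars.lower new_id.toList).foldl (fun out ch =>
      if PySem.Chars.isalnum ch = true ∨ ch = '-' ∨ ch = '_' then out ++ [ch]
      else if ch = '.' ∧ out ≠ [] ∧ out.getLast? ≠ some '.' then out ++ [ch]
      else out) []
  let s := if out.getLast? = some '.' then out.dropLast else out
  let s2 := if s = [] then ['a'] else s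
  let s3 := if 16 ≤ s2.length then
              (let t := s2.take 15; if t.getLast? = some '.' then t.dropLast else t)
            else s2
  String.ofList (s3 ++ List.replicate (3 - s3.length) (s3.getLast?.getD 'a'))

-- ===== PRECONDITION & SPEC =====
def Spec_solution (new_id : String) (out : String) : Prop := out = solution_alt new_id
instance (new_id : String) (out : String) : Decidable (Spec_solution new_id out) := by unfold Spec_solution; infer_instance

-- ===== CLAIM (what is proved, stated in full; the proofs are below) =====
def Claim_equal_solution : Prop := ∀ (new_id : String), Dom_solution new_id → Spec_solution new_id (solution new_id)

-- ===== LEMMAS AND PROOFS =====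

-- the characters A's step 2 keeps
def pvKd (c : Char) : Bool := PySem.Chars.isalnum c || c == '-' || c == '_' || c == '.'

-- the collapsed filter both programs compute; q = "a '.' here would be dropped"
def pvCg (q : Bool) : List Char → List Char
  | [] => []
  | c :: t => if c = '.' then (if q then pvCg true t else '.' :: pvCg true t) else c :: pvCg false t

def pvBlankPrefix : List (List Char) → List (List Char)
  | [] => []
  | e :: t => if e = ['.'] then [] :: pvBlankPrefix t else e :: t

theorem pvBlankPrefix_length (t : List (List Char)) : (pvBlankPrefix t).length = t.length := by
  induction t with
  | nil => rfl
  | cons e t ih => simp only [pvBlankPrefix]; split <;> simp [ih]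

def pvC3 : List (List Char) → List (List Char)
  | [] => []
  | e :: t => if e = ['.'] then e :: pvC3 (pvBlankPrefix t) else e :: pvC3 t
termination_by l => l.length
decreasing_by all_goals simp [pvBlankPrefix_length]

theorem pvC3_cons_dot (t : List (List Char)) :
    pvC3 (['.'] :: t) = ['.'] :: pvC3 (pvBlankPrefix t) := by
  rw [pvC3]; simp

theorem pvC3_cons_ne (e : List Char) (t : List (List Char)) (h : ¬ (e = ['.'])) :
    pvC3 (e :: t) = e :: pvC3 t := by
  rw [pvC3]; simp [h]

theorem pv_getD_append_len (pre : List (List Char)) (e : List Char) (t : List (List Char)) :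
    (pre ++ e :: t).getD pre.length [] = e := by
  induction pre with
  | nil => rfl
  | cons a pre ih => simp only [List.cons_append, List.length_cons, List.getD_cons_succ]; exact ih

theorem pv_set_append_len (pre : List (List Char)) (e x : List Char) (t : List (List Char)) :
    (pre ++ e :: t).set pre.length x = pre ++ x :: t := by
  induction pre with
  | nil => rfl
  | cons a pre ih => simp [ih]

theorem pv_step2_go (suf : List (List Char)) : ∀ (pre : List (List Char)),
    (List.range' pre.length suf.length).foldl (fun acc i =>
        if acc.getD i [] ∉ [['-'], ['_'], ['.']] ∧ PySem.Chars.strIsalnum (acc.getD i []) = false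
        then acc.set i [] else acc) (pre ++ suf)
      = pre ++ suf.map (fun e =>
          if e ∉ [['-'], ['_'], ['.']] ∧ PySem.Chars.strIsalnum e = false then [] else e) := by
  induction suf with
  | nil => intro pre; simp
  | cons e t ih =>
    intro pre
    rw [List.length_cons, List.range'_succ, List.foldl_cons, pv_getD_append_len]
    by_cases hcond : e ∉ [['-'], ['_'], ['.']] ∧ PySem.Chars.strIsalnum e = false
    · rw [if_pos hcond, pv_set_append_len]
      have h1 : (pre ++ [] :: t : List (List Char)) = (pre ++ [([] : List Char)]) ++ t := by simp
      have h2 : pre.length + 1 = (pre ++ [([] : List Char)]).length := by simp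
      rw [h1, h2, ih]
      simp only [List.map_cons, if_pos hcond]
      simp
    · rw [if_neg hcond]
      have h1 : (pre ++ e :: t : List (List Char)) = (pre ++ [e]) ++ t := by simp
      have h2 : pre.length + 1 = (pre ++ [e]).length := by simp
      rw [h1, h2, ih]
      simp only [List.map_cons, if_neg hcond]
      simp

theorem pv_blankRun_spec (t : List (List Char)) : ∀ (pre2 : List (List Char)) (i j len : Nat),
    pre2.length = i + j → len = pre2.length + t.length →
    pvBlankRun (pre2 ++ t) i j len = pre2 ++ pvBlankPrefix t := by
  induction t with
  | nil =>
    intro pre2 i j len h hlen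
    rw [pvBlankRun]
    have hlen' : len = pre2.length := by simp at hlen; exact hlen
    have : ¬ (i + j < len ∧ ((pre2 ++ [] : List (List Char)).getD (i + j) []) = ['.']) := by
      intro hh; exact absurd hh.1 (by omega)
    simp [pvBlankPrefix]
    intro h1
    exact absurd h1 (by omega)
  | cons e t ih =>
    intro pre2 i j len h hlen
    rw [pvBlankRun]
    have hget : (pre2 ++ e :: t).getD (i + j) [] = e := by rw [← h]; exact pv_getD_append_len _ _ _
    by_cases he : e = ['.']
    · have hc : i + j < len ∧ (pre2 ++ e :: t).getD (i + j) [] = ['.'] := by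
        refine ⟨by simp at hlen; omega, by rw [hget, he]⟩
      rw [dif_pos hc]
      have hset : (pre2 ++ e :: t).set (i + j) [] = (pre2 ++ [([] : List Char)]) ++ t := by
        rw [← h, pv_set_append_len]; simp
      rw [hset]
      rw [ih (pre2 ++ [[]]) i (j + 1) len (by simp [h]; omega) (by simp at hlen ⊢; omega)]
      simp [pvBlankPrefix, he]
    · have hc : ¬ (i + j < len ∧ (pre2 ++ e :: t).getD (i + j) [] = ['.']) := by
        rw [hget]; tauto
      rw [dif_neg hc]
      simp [pvBlankPrefix, he]

theorem pv_step3_go (n : Nat) : ∀ (suf pre : List (List Char)) (len : Nat),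
    suf.length = n → len = pre.length + n →
    (List.range' pre.length n).foldl (fun acc i =>
        if acc.getD i [] = ['.'] then pvBlankRun acc i 1 len else acc) (pre ++ suf)
      = pre ++ pvC3 suf := by
  induction n with
  | zero =>
    intro suf pre len hn hlen
    have : suf = [] := List.eq_nil_of_length_eq_zero hn
    subst this
    simp [pvC3]
  | succ n ih =>
    intro suf pre len hn hlen
    cases suf with
    | nil => simp at hn
    | cons e t =>
      rw [List.range'_succ, List.foldl_cons, pv_getD_append_len]
      by_cases he : e = ['.']
      · rw [if_pos he]
        subst he
        have hbr : pvBlankRun (pre ++ ['.'] :: t) pre.length 1 len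
            = (pre ++ [(['.'] : List Char)]) ++ pvBlankPrefix t := by
          have := pv_blankRun_spec t (pre ++ [['.']]) pre.length 1 len (by simp)
            (by simp at hn ⊢; omega)
          rw [← this]; simp
        rw [hbr]
        have h2 : pre.length + 1 = (pre ++ [(['.'] : List Char)]).length := by simp
        rw [h2, ih (pvBlankPrefix t) (pre ++ [['.']]) len
          (by rw [pvBlankPrefix_length]; simpa using hn) (by simp at hlen ⊢; omega)]
        rw [pvC3_cons_dot]
        simp
      · rw [if_neg he]
        have h1 : (pre ++ e :: t : List (List Char)) = (pre ++ [e]) ++ t := by simp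
        have h2 : pre.length + 1 = (pre ++ [e]).length := by simp
        rw [h1, h2, ih t (pre ++ [e]) len (by simpa using hn) (by simp at hlen ⊢; omega)]
        rw [pvC3_cons_ne _ _ he]
        simp

theorem pv_flatten_step2 (s1 : List Char) :
    ((s1.map (fun c => [c])).map (fun e =>
        if e ∉ [['-'], ['_'], ['.']] ∧ PySem.Chars.strIsalnum e = false then [] else e)).flatten
      = s1.filter pvKd := by
  induction s1 with
  | nil => rfl
  | cons c t ih =>
    simp only [List.map_cons, List.flatten_cons, List.filter_cons]
    rw [ih]
    have hs : PySem.Chars.strIsalnum [c] = PySem.Chars.isalnum c := by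
      simp [PySem.Chars.strIsalnum]
    by_cases hk : pvKd c = true
    · have hC : ¬ (([c] : List Char) ∉ [['-'], ['_'], ['.']] ∧ PySem.Chars.strIsalnum [c] = false) := by
        rintro ⟨hmem, hsal⟩
        rw [hs] at hsal
        simp only [pvKd, Bool.or_eq_true, beq_iff_eq] at hk
        rcases hk with ((hk | rfl) | rfl) | rfl
        · rw [hk] at hsal; cases hsal
        all_goals simp at hmem
      rw [if_neg hC]
      simp [hk]
    · have hk' : pvKd c = false := by rwa [Bool.not_eq_true] at hk
      simp only [pvKd, Bool.or_eq_false_iff, beq_eq_false_iff_ne, ne_eq] at hk'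
      have hC : (([c] : List Char) ∉ [['-'], ['_'], ['.']] ∧ PySem.Chars.strIsalnum [c] = false) := by
        refine ⟨?_, by rw [hs]; simpa using hk'.1.1.1⟩
        simp only [List.mem_cons, List.cons.injEq, and_true, not_or, List.not_mem_nil,
          not_false_eq_true]
        exact ⟨hk'.1.1.2, hk'.1.2, hk'.2⟩
      rw [if_pos hC]
      simp [hk]

theorem pv_flatten_c3 (m : List Char) : ∀ (q : Bool),
    (pvC3 (if q then pvBlankPrefix (m.map (fun c => [c])) else m.map (fun c => [c]))).flatten
      = pvCg q m := by
  induction m with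
  | nil => intro q; cases q <;> simp [pvC3, pvBlankPrefix, pvCg]
  | cons c t ih =>
    intro q
    have ihT : (pvC3 (pvBlankPrefix (List.map (fun c => [c]) t))).flatten = pvCg true t := by
      simpa using ih true
    have ihF : (pvC3 (List.map (fun c => [c]) t)).flatten = pvCg false t := by
      simpa using ih false
    by_cases hc : c = '.'
    · subst hc
      cases q with
      | false =>
        simp only [List.map_cons]
        rw [if_neg (by decide : ¬ (false = true)), pvC3_cons_dot]
        simp [ihT, pvCg]
      | true =>
        simp only [List.map_cons, reduceIte, pvBlankPrefix]
        simp only [pvC3_cons_ne _ _ (by simp : ¬ (([] : List Char) = ['.']))]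
        simp [ihT, pvCg]
    · have hne : ¬ (([c] : List Char) = ['.']) := by simpa using hc
      cases q with
      | false =>
        simp only [List.map_cons]
        rw [if_neg (by decide : ¬ (false = true)), pvC3_cons_ne _ _ hne]
        simp [ihF, pvCg, hc]
      | true =>
        simp only [List.map_cons, reduceIte, pvBlankPrefix]
        rw [if_neg hne, pvC3_cons_ne _ _ hne]
        simp [ihF, pvCg, hc]

theorem pv_foldB (l : List Char) : ∀ (out : List Char) (p : Bool),
    p = (out.isEmpty || out.getLast? == some '.') →
    l.foldl (fun out ch =>
      if PySem.Chars.isalnum ch = true ∨ ch = '-' ∨ ch = '_' then out ++ [ch]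
      else if ch = '.' ∧ out ≠ [] ∧ out.getLast? ≠ some '.' then out ++ [ch]
      else out) out = out ++ pvCg p (l.filter pvKd) := by
  induction l with
  | nil => intro out p hp; simp [pvCg]
  | cons c t ih =>
    intro out p hp
    by_cases hk : PySem.Chars.isalnum c = true ∨ c = '-' ∨ c = '_'
    · have hcd : ¬ (c = '.') := by
        rintro rfl
        rcases hk with h | h | h <;> revert h <;> decide
      have hkd : pvKd c = true := by
        simp only [pvKd, Bool.or_eq_true, beq_iff_eq]
        tauto
      simp only [List.foldl_cons, if_pos hk]
      rw [ih (out ++ [c]) false (by simp [hcd])]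
      simp [hkd, pvCg, hcd]
    · by_cases hd : c = '.'
      · subst hd
        have hkd : pvKd '.' = true := by decide
        have hfc : List.filter pvKd ('.' :: t) = '.' :: List.filter pvKd t := by
          simp [hkd]
        cases p with
        | true =>
          have hor : out = [] ∨ out.getLast? = some '.' := by
            have h := hp.symm
            simpa [List.isEmpty_iff] using h
          have hcond : ¬ (out ≠ [] ∧ out.getLast? ≠ some '.') := by tauto
          simp only [List.foldl_cons, if_neg hk, true_and, if_neg hcond]
          rw [ih out true hp]
          simp [hfc, pvCg]
        | false =>
          have hout : ¬ (out = []) ∧ ¬ (out.getLast? = some '.') := by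
            have h := hp.symm
            simp only [Bool.or_eq_false_iff, List.isEmpty_eq_false_iff, beq_eq_false_iff_ne,
              ne_eq] at h
            exact ⟨by simpa [List.isEmpty_iff] using h.1, h.2⟩
          have hcond : (out ≠ [] ∧ out.getLast? ≠ some '.') := ⟨hout.1, hout.2⟩
          simp only [List.foldl_cons, if_neg hk, true_and, if_pos hcond]
          rw [ih (out ++ ['.']) true (by simp)]
          simp [hfc, pvCg]
      · have hka : ¬ (PySem.Chars.isalnum c = true) := by tauto
        have hkd : pvKd c = false := by
          simp only [pvKd, Bool.or_eq_false_iff, beq_eq_false_iff_ne, ne_eq]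
          refine ⟨⟨⟨by simpa using hka, ?_⟩, ?_⟩, hd⟩ <;> (rintro rfl; exact hk (by simp))
        have hcond : ¬ (c = '.' ∧ out ≠ [] ∧ out.getLast? ≠ some '.') := by tauto
        simp only [List.foldl_cons, if_neg hk, if_neg hcond]
        rw [ih out p hp]
        simp [hkd]

theorem pv_strip_head (m : List Char) :
    (if (pvCg false m).head? = some '.' then (pvCg false m).drop 1 else pvCg false m)
      = pvCg true m := by
  cases m with
  | nil => simp [pvCg]
  | cons c t =>
    by_cases hc : c = '.'
    · subst hc; simp [pvCg]
    · simp [pvCg, hc]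

theorem pv_pad7_eq (l : List Char) (c : Char) (h : l.getLast? = some c) :
    pvPad7 l = l ++ List.replicate (3 - l.length) c := by
  rw [pvPad7]
  by_cases h2 : l.length ≤ 2
  · simp only [h2, dif_pos, h]
    rw [pv_pad7_eq (l ++ [c]) c (by simp)]
    have h3 : 3 - l.length = (3 - (l ++ [c]).length) + 1 := by simp; omega
    rw [h3, List.replicate_succ]
    simp
  · have : 3 - l.length = 0 := by omega
    simp [h2, this]
termination_by 3 - l.length
decreasing_by simp; omega

theorem pv_step2_top (s1 : List Char) :
    (List.range s1.length).foldl (fun acc i =>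
        if acc.getD i [] ∉ [['-'], ['_'], ['.']] ∧ PySem.Chars.strIsalnum (acc.getD i []) = false
        then acc.set i [] else acc) (s1.map (fun c => [c]))
      = (s1.map (fun c => [c])).map (fun e =>
          if e ∉ [['-'], ['_'], ['.']] ∧ PySem.Chars.strIsalnum e = false then [] else e) := by
  have h := pv_step2_go (s1.map (fun c => [c])) []
  simpa [List.range_eq_range'] using h

theorem pv_step3_top (m : List Char) :
    (List.range m.length).foldl (fun acc i =>
        if acc.getD i [] = ['.'] then pvBlankRun acc i 1 m.length else acc) (m.map (fun c => [c]))
      = pvC3 (m.map (fun c => [c])) := by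
  have h := pv_step3_go m.length (m.map (fun c => [c])) [] m.length (by simp) (by simp)
  simpa [List.range_eq_range'] using h

theorem pv_s5_ne (Y : List Char) : (if Y = [] then ['a'] else Y) ≠ [] := by
  split_ifs with h <;> simp [h]

theorem pv_s6_ne (Z : List Char) (hZ : Z ≠ []) :
    (if 16 ≤ Z.length then
        (let t := Z.take 15; if t.getLast? = some '.' then t.dropLast else t)
      else Z) ≠ [] := by
  by_cases h1 : 16 ≤ Z.length
  · simp only [if_pos h1]
    have ht : (Z.take 15).length = 15 := by rw [List.length_take]; omega
    by_cases h2 : (Z.take 15).getLast? = some '.'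
    · simp only [if_pos h2]
      intro hnil
      have := congrArg List.length hnil
      simp [List.length_dropLast, ht] at this
    · simp only [if_neg h2]
      intro hnil
      have := congrArg List.length hnil
      simp [ht] at this
  · simp only [if_neg h1]; exact hZ

theorem solution_eq_alt (new_id : String) : solution new_id = solution_alt new_id := by
  unfold solution solution_alt
  dsimp only
  rw [pv_step2_top, pv_flatten_step2, pv_step3_top]
  have hfc : (pvC3 (((PySem.Chars.lower new_id.toList).filter pvKd).map (fun c => [c]))).flatten
      = pvCg false ((PySem.Chars.lower new_id.toList).filter pvKd) := by
    simpa using pv_flatten_c3 ((PySem.Chars.lower new_id.toList).filter pvKd) false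
  rw [hfc, pv_strip_head]
  rw [pv_foldB (PySem.Chars.lower new_id.toList) [] true (by simp)]
  rw [List.nil_append]
  generalize (pvCg true ((PySem.Chars.lower new_id.toList).filter pvKd)) = X
  generalize hY : (if X.getLast? = some '.' then X.dropLast else X) = Y
  generalize hZ : (if Y = [] then ['a'] else Y) = Z
  have hZne : Z ≠ [] := hZ ▸ pv_s5_ne Y
  generalize hW : (if 16 ≤ Z.length then
      (let t := Z.take 15; if t.getLast? = some '.' then t.dropLast else t) else Z) = W
  have hWne : W ≠ [] := hW ▸ pv_s6_ne Z hZne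
  obtain ⟨cl, hcl⟩ : ∃ c, W.getLast? = some c := by
    cases hw : W.getLast? with
    | none => exact absurd (List.getLast?_eq_none_iff.mp hw) hWne
    | some c => exact ⟨c, rfl⟩
  rw [pv_pad7_eq W cl hcl, hcl]
  rfl

-- ===== VERDICT (by name: the statement is the Claim_ definition above) =====
theorem solution_spec : Claim_equal_solution := by
  intro new_id _
  unfold Spec_solution
  exact solution_eq_alt new_id
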